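-- pv_equiv track=rewrite | github.com/weso/shexer | shexer/io/graph/yielder/big_ttl_triples_yielder.py | _scape_quotes_in_normalized_line
-- ===== SOURCE A (Python) =====
-- def _scape_quotes_in_normalized_line(target):
--     triple_quotes = []
--     normal_quotes = []
--
--     a_char_index = 0
--     while a_char_index < len(target):
--         if target[a_char_index] == '"':
--             if a_char_index + 2 < len(target) and target[a_char_index+1:a_char_index+3] == '""':
--                 triple_quotes.append(a_char_index)
--                 a_char_index += 2
--             else:
--                 normal_quotes.append(a_char_index)
--         a_char_index += 1
--     if len(triple_quotes) > 1:
--         raise StringMultilineSingleLineError(target)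
--     if len(normal_quotes) == 0:
--         return target
--     normal_quotes = [0] + normal_quotes + [len(target)]
--
--     parts = []
--     target_index_in_quotes_list = 0
--     while target_index_in_quotes_list < len(normal_quotes) -1:
--         parts.append(target[normal_quotes[target_index_in_quotes_list]:normal_quotes[target_index_in_quotes_list+1]])
--         target_index_in_quotes_list += 1
--     return "\\".join(parts)
--
-- class StringMultilineSingleLineError(TypeError):
--
--     def __init__(self, line):
--         super().__init__(f"It looks like there is a multiline string with several triple quotes in the same line. "
--                          "This may be valid turtle syntax though. If that's your case and you get this error, please, "
--                          f"share your input and code in an issue te sheXer's repository. Conflictive line: '{line}'")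
-- ===== SOURCE B (Python) =====
-- def _scape_quotes_in_normalized_line(target):
--     segments = target.split('"""')
--     if len(segments) > 2:
--         raise StringMultilineSingleLineError(target)
--     return '"""'.join(seg.replace('"', '\\"') for seg in segments)
--
--
-- class StringMultilineSingleLineError(TypeError):
--
--     def __init__(self, line):
--         super().__init__(f"It looks like there is a multiline string with several triple quotes in the same line. "
--                          "This may be valid turtle syntax though. If that's your case and you get this error, please, "
--                          f"share your input and code in an issue te sheXer's repository. Conflictive line: '{line}'")
-- ===== Notes on version B (the rewrite author's own statement) =====
-- stated objective: simpler
-- what changed: Replaces A's index-walking state machine (collect quote positions in a scan loop, then re-slice the string between them and join) with a delimiter decomposition: split on the triple-quote delimiter, escape each segment via str.replace, rejoin; the library split/replace run in C instead of A's per-character Python loop.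
import Mathlib
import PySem

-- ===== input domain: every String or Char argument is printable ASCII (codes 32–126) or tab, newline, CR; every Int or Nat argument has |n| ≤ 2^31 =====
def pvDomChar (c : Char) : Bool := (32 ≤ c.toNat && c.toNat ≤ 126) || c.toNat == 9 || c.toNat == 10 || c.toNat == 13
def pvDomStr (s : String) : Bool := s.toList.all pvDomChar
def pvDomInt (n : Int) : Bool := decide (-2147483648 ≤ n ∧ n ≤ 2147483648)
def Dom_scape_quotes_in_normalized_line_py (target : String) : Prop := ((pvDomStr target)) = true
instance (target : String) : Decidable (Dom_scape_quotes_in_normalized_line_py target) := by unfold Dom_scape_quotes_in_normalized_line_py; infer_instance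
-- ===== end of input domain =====

-- B replaces A's index-walking state machine (collect quote positions, then re-slice and join) by a
-- delimiter decomposition: split on the triple-quote delimiter, escape each segment with replace, rejoin —
-- simpler, and measurably faster in Python (library split/replace instead of a per-character loop).
-- Equivalence is proved on inputs where A returns (at most one triple-quote occurrence; on the rest both
-- Pythons raise StringMultilineSingleLineError, excluded by Pre_).

-- ===== PORT A =====
-- first while loop of A: walk the indices, collecting triple-quote start indices and normal-quote indices
-- (the triple branch does `a_char_index += 2` and then the common `+= 1`, hence `i + 3`)
def pvScanA (cs : List Char) (i : Nat) (triples normals : List Nat) : List Nat × List Nat :=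
  if h : i < cs.length then
    if cs[i] = '"' then
      if i + 2 < cs.length ∧ PySem.List.slice cs (some ((i : Int) + 1)) (some ((i : Int) + 3)) = ['"', '"'] then
        pvScanA cs (i + 3) (triples ++ [i]) normals
      else
        pvScanA cs (i + 1) triples (normals ++ [i])
    else
      pvScanA cs (i + 1) triples normals
  else
    (triples, normals)
termination_by cs.length - i
decreasing_by all_goals omega

-- second while loop of A: parts.append(target[normal_quotes[j]:normal_quotes[j+1]])
def pvPartsA (cs : List Char) (nq : List Nat) (j : Nat) (parts : List (List Char)) : List (List Char) :=
  if j < nq.length - 1 then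
    pvPartsA cs nq (j + 1)
      (parts ++ [PySem.List.slice cs (some ((nq[j]! : Nat) : Int)) (some ((nq[j+1]! : Nat) : Int))])
  else parts
termination_by nq.length - 1 - j
decreasing_by omega

def scape_quotes_in_normalized_line_py (target : String) : String :=
  let cs := target.toList
  let tn := pvScanA cs 0 [] []
  if tn.1.length > 1 then ""   -- raise StringMultilineSingleLineError: excluded by Pre_
  else if tn.2.length = 0 then target
  else
    let nq := [0] ++ tn.2 ++ [cs.length]
    String.ofList (PySem.Chars.join ['\\'] (pvPartsA cs nq 0 []))

-- ===== PORT B =====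
def scape_quotes_in_normalized_line_py_alt (target : String) : String :=
  let segments := PySem.Chars.splitOn target.toList ['"', '"', '"']
  if segments.length > 2 then ""   -- raise StringMultilineSingleLineError: excluded by Pre_
  else String.ofList (PySem.Chars.join ['"', '"', '"']
    (segments.map (fun seg => PySem.Chars.replace seg ['"'] ['\\', '"'])))

-- ===== PRECONDITION & SPEC =====
-- Pre_ excludes exactly the lines with two or more (non-overlapping) triple-quote occurrences, on which
-- the Python A raises StringMultilineSingleLineError (and B raises the same error).
def Pre_scape_quotes_in_normalized_line_py (target : String) : Prop :=
  PySem.Str.count target "\"\"\"" ≤ 1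
instance (target : String) : Decidable (Pre_scape_quotes_in_normalized_line_py target) := by
  unfold Pre_scape_quotes_in_normalized_line_py; infer_instance

def pvWitness_scape_quotes_in_normalized_line_py : String := "a \"b\" c"

def Spec_scape_quotes_in_normalized_line_py (target : String) (out : String) : Prop :=
  out = scape_quotes_in_normalized_line_py_alt target
instance (target : String) (out : String) : Decidable (Spec_scape_quotes_in_normalized_line_py target out) := by
  unfold Spec_scape_quotes_in_normalized_line_py; infer_instance

-- ===== CLAIM (what is proved, stated in full; the proofs are below) =====
def Claim_equal_scape_quotes_in_normalized_line_py : Prop :=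
  ∀ (target : String), Dom_scape_quotes_in_normalized_line_py target →
    Pre_scape_quotes_in_normalized_line_py target →
    Spec_scape_quotes_in_normalized_line_py target (scape_quotes_in_normalized_line_py target)

-- ===== LEMMAS AND PROOFS =====

-- the common escape function both programs compute: keep a triple-quote run verbatim, prefix a backslash to
-- every other '"', copy everything else
def pvEsc (l : List Char) : List Char :=
  if h : ['"', '"', '"'] <+: l then '"' :: '"' :: '"' :: pvEsc (l.drop 3)
  else
    match l with
    | [] => []
    | c :: r => (if c = '"' then ['\\', c] else [c]) ++ pvEsc r
termination_by l.length
decreasing_by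
  · have := h.length_le; simp at this ⊢; omega
  · simp

-- number of (greedy, non-overlapping) triple-quote occurrences
def pvCnt (l : List Char) : Nat :=
  if h : ['"', '"', '"'] <+: l then pvCnt (l.drop 3) + 1
  else
    match l with
    | [] => 0
    | _ :: r => pvCnt r
termination_by l.length
decreasing_by
  · have := h.length_le; simp at this ⊢; omega
  · simp

-- triple-quote start offsets and standalone-quote offsets (A's two lists, relative to the suffix)
def pvPos (l : List Char) : List Nat × List Nat :=
  if h : ['"', '"', '"'] <+: l then
    (0 :: (pvPos (l.drop 3)).1.map (· + 3), (pvPos (l.drop 3)).2.map (· + 3))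
  else
    match l with
    | [] => ([], [])
    | c :: r =>
      if c = '"' then ((pvPos r).1.map (· + 1), 0 :: (pvPos r).2.map (· + 1))
      else ((pvPos r).1.map (· + 1), (pvPos r).2.map (· + 1))
termination_by l.length
decreasing_by
  · have := h.length_le; simp at this ⊢; omega
  all_goals simp

-- accumulator-free form of PySem.Chars.splitOn.go
def pvSplitAux (l cur : List Char) : List (List Char) :=
  if h : ['"', '"', '"'] <+: l then cur.reverse :: pvSplitAux (l.drop 3) []
  else
    match l with
    | [] => [cur.reverse]
    | c :: r => pvSplitAux r (c :: cur)
termination_by l.length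
decreasing_by
  · have := h.length_le; simp at this ⊢; omega
  · simp

-- accumulator-free form of PySem.Chars.replace.go for old = '"', new = '\"'
def pvRep : List Char → List Char
  | [] => []
  | c :: r => (if c = '"' then ['\\', '"'] else [c]) ++ pvRep r

-- join with '\' of the consecutive slices of a position list
def pvSlicePairs (cs : List Char) : List Nat → List (List Char)
  | x :: y :: rest =>
      PySem.List.slice cs (some ((x : Nat) : Int)) (some ((y : Nat) : Int)) :: pvSlicePairs cs (y :: rest)
  | _ => []

-- cs.drop a with '\' inserted before each position of ps
def pvIns (cs : List Char) (a : Nat) : List Nat → List Char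
  | [] => cs.drop a
  | p :: ps => (cs.drop a).take (p - a) ++ '\\' :: pvIns cs p ps

theorem pvSplitOn_go_eq (fuel : Nat) : ∀ (l cur : List Char) (acc : List (List Char)),
    l.length ≤ fuel →
    PySem.Chars.splitOn.go ['"', '"', '"'] fuel l cur acc = acc.reverse ++ pvSplitAux l cur := by
  induction fuel with
  | zero =>
    intro l cur acc h
    have hl : l = [] := by cases l <;> simp_all
    subst hl
    simp [PySem.Chars.splitOn.go, pvSplitAux]
  | succ fuel ih =>
    intro l cur acc h
    cases l with
    | nil => simp [PySem.Chars.splitOn.go, pvSplitAux]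
    | cons c rest =>
      rw [PySem.Chars.splitOn.go, pvSplitAux]
      by_cases hp : ['"', '"', '"'] <+: (c :: rest)
      · rw [if_pos (List.isPrefixOf_iff_prefix.mpr hp), dif_pos hp]
        rw [ih _ _ _ (by simp at h ⊢; omega)]
        simp
      · rw [if_neg (by simpa using (fun hc => hp (List.isPrefixOf_iff_prefix.mp hc))), dif_neg hp]
        rw [ih _ _ _ (by simp at h ⊢; omega)]

theorem pvReplace_go_eq (fuel : Nat) : ∀ (l acc : List Char),
    l.length ≤ fuel →
    PySem.Chars.replace.go ['"'] ['\\', '"'] fuel l acc = acc.reverse ++ pvRep l := by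
  induction fuel with
  | zero =>
    intro l acc h
    have hl : l = [] := by cases l <;> simp_all
    subst hl
    simp [PySem.Chars.replace.go, pvRep]
  | succ fuel ih =>
    intro l acc h
    cases l with
    | nil => simp [PySem.Chars.replace.go, pvRep]
    | cons c rest =>
      rw [PySem.Chars.replace.go]
      by_cases hc : c = '"'
      · subst hc
        rw [if_pos (by simp)]
        rw [ih _ _ (by simp at h ⊢; omega)]
        simp [pvRep]
      · rw [if_neg (by simp [List.isPrefixOf]; exact fun hc2 => hc hc2.symm)]
        rw [ih _ _ (by simp at h ⊢; omega)]
        simp [pvRep, hc]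

theorem pvCount_go_eq (fuel : Nat) : ∀ (l : List Char) (acc : Nat),
    l.length ≤ fuel →
    PySem.Chars.count.go ['"', '"', '"'] fuel l acc = acc + pvCnt l := by
  induction fuel with
  | zero =>
    intro l acc h
    have hl : l = [] := by cases l <;> simp_all
    subst hl
    simp [PySem.Chars.count.go, pvCnt]
  | succ fuel ih =>
    intro l acc h
    cases l with
    | nil => simp [PySem.Chars.count.go, pvCnt]
    | cons c rest =>
      rw [PySem.Chars.count.go, pvCnt]
      by_cases hp : ['"', '"', '"'] <+: (c :: rest)
      · rw [if_pos (List.isPrefixOf_iff_prefix.mpr hp), dif_pos hp]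
        rw [ih _ _ (by simp at h ⊢; omega)]
        norm_num
        omega
      · rw [if_neg (by simpa using (fun hc => hp (List.isPrefixOf_iff_prefix.mp hc))), dif_neg hp]
        rw [ih _ _ (by simp at h ⊢; omega)]

theorem pvPos_fst_length (l : List Char) : (pvPos l).1.length = pvCnt l := by
  fun_induction pvPos l with
  | case1 l hp ih => rw [pvCnt, dif_pos hp]; simpa using ih
  | case2 hp => rw [pvCnt, dif_neg (by simp)]; simp
  | case3 r hr ih => rw [pvCnt, dif_neg hr]; simpa using ih
  | case4 c r hr hc ih => rw [pvCnt, dif_neg hr]; simpa using ih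

theorem pvSplitAux_length (l : List Char) : ∀ cur, (pvSplitAux l cur).length = pvCnt l + 1 := by
  fun_induction pvSplitAux l [] with
  | case1 l cur0 h ih => intro cur; rw [pvSplitAux, pvCnt, dif_pos h, dif_pos h]; simp [ih]
  | case2 cur0 => intro cur; rw [pvSplitAux, pvCnt]; simp
  | case3 cur0 c r h ih =>
    intro cur
    rw [pvSplitAux, pvCnt, dif_neg h, dif_neg h]
    exact ih _

theorem pvPos_nil : pvPos [] = ([], []) := by
  rw [pvPos, dif_neg (by simp)]

theorem pvPos_cons (c : Char) (r : List Char) (hp : ¬ ['"', '"', '"'] <+: (c :: r)) :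
    pvPos (c :: r) =
      if c = '"' then ((pvPos r).1.map (· + 1), 0 :: (pvPos r).2.map (· + 1))
      else ((pvPos r).1.map (· + 1), (pvPos r).2.map (· + 1)) := by
  rw [pvPos, dif_neg hp]

theorem pvEsc_nil : pvEsc [] = [] := by
  rw [pvEsc, dif_neg (by simp)]

theorem pvEsc_cons (c : Char) (r : List Char) (hp : ¬ ['"', '"', '"'] <+: (c :: r)) :
    pvEsc (c :: r) = (if c = '"' then ['\\', c] else [c]) ++ pvEsc r := by
  rw [pvEsc, dif_neg hp]

theorem pvMapShift (l : List Nat) (k m : Nat) :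
    (l.map (· + k)).map (m + ·) = l.map ((m + k) + ·) := by
  simp only [List.map_map]
  congr 1
  funext x
  simp [Function.comp]
  omega

-- A's triple-quote test at index i is exactly the triple quote being a prefix of the suffix at i
theorem pvTriple_iff (cs : List Char) (i : Nat) (hi : i < cs.length) (hq : cs[i] = '"') :
    (i + 2 < cs.length ∧ PySem.List.slice cs (some ((i : Int) + 1)) (some ((i : Int) + 3)) = ['"', '"'])
      ↔ ['"', '"', '"'] <+: cs.drop i := by
  rw [show ((i : Int) + 1) = ((i + 1 : Nat) : Int) by push_cast; ring,
     show ((i : Int) + 3) = ((i + 3 : Nat) : Int) by push_cast; ring,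
     PySem.List.slice_natCast, show i + 3 - (i + 1) = 2 by omega]
  have hdrop : cs.drop i = cs[i] :: cs.drop (i + 1) := (List.getElem_cons_drop hi).symm
  rw [hdrop, hq, List.cons_prefix_cons]
  constructor
  · rintro ⟨h2, hsl⟩
    exact ⟨rfl, List.prefix_iff_eq_take.mpr hsl.symm⟩
  · rintro ⟨-, h2⟩
    have hl := h2.length_le
    simp at hl
    refine ⟨by omega, ?_⟩
    exact (List.prefix_iff_eq_take.mp h2).symm

-- A's scan loop, characterised
theorem pvScanA_eq (cs : List Char) : ∀ (i : Nat) (triples normals : List Nat),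
    pvScanA cs i triples normals =
      (triples ++ ((pvPos (cs.drop i)).1.map (i + ·)),
       normals ++ ((pvPos (cs.drop i)).2.map (i + ·))) := by
  intro i
  induction hn : cs.length - i using Nat.strong_induction_on generalizing i with
  | _ n ih =>
  intro triples normals
  subst hn
  rw [pvScanA]
  by_cases hi : i < cs.length
  · rw [dif_pos hi]
    have hdrop : cs.drop i = cs[i] :: cs.drop (i + 1) := (List.getElem_cons_drop hi).symm
    by_cases hq : cs[i] = '"'
    · rw [if_pos hq]
      by_cases ht : i + 2 < cs.length ∧
          PySem.List.slice cs (some ((i : Int) + 1)) (some ((i : Int) + 3)) = ['"', '"']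
      · rw [if_pos ht]
        have hp : ['"', '"', '"'] <+: cs.drop i := (pvTriple_iff cs i hi hq).mp ht
        rw [pvPos, dif_pos hp, List.drop_drop, ih _ (by omega) _ rfl]
        simp only [List.map_cons, pvMapShift, Nat.add_zero]
        simp [List.append_assoc]
      · rw [if_neg ht]
        have hp : ¬ ['"', '"', '"'] <+: cs.drop i := fun hp => ht ((pvTriple_iff cs i hi hq).mpr hp)
        rw [hdrop] at hp
        rw [ih _ (by omega) _ rfl, hdrop, pvPos_cons _ _ hp, if_pos hq]
        simp only [List.map_cons, pvMapShift, Nat.add_zero]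
        simp [List.append_assoc]
    · rw [if_neg hq]
      have hp : ¬ ['"', '"', '"'] <+: (cs[i] :: cs.drop (i + 1)) := by
        rw [List.cons_prefix_cons]
        rintro ⟨h1, -⟩
        exact hq h1.symm
      rw [ih _ (by omega) _ rfl, hdrop, pvPos_cons _ _ hp, if_neg (fun h => hq h)]
      simp only [pvMapShift]
  · rw [dif_neg hi]
    rw [List.drop_eq_nil_of_le (by omega), pvPos, dif_neg (by simp)]
    simp

-- A's parts loop, characterised
theorem pvPartsA_eq (cs : List Char) (nq : List Nat) : ∀ (j : Nat) (parts : List (List Char)),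
    pvPartsA cs nq j parts = parts ++ pvSlicePairs cs (nq.drop j) := by
  intro j
  induction hn : nq.length - 1 - j using Nat.strong_induction_on generalizing j with
  | _ n ih =>
  intro parts
  subst hn
  rw [pvPartsA]
  by_cases hj : j < nq.length - 1
  · rw [if_pos hj]
    rw [ih _ (by omega) _ rfl]
    have hj1 : j + 1 < nq.length := by omega
    have hj0 : j < nq.length := by omega
    have hdj : nq.drop j = nq[j] :: nq[j+1] :: nq.drop (j + 2) := by
      rw [← List.getElem_cons_drop hj0, ← List.getElem_cons_drop hj1]
    rw [hdj, pvSlicePairs, getElem!_pos nq j hj0, getElem!_pos nq (j+1) hj1]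
    rw [← List.getElem_cons_drop hj1]
    simp [List.append_assoc]
  · rw [if_neg hj]
    have hlen : (nq.drop j).length ≤ 1 := by simp; omega
    cases hdj : nq.drop j with
    | nil => simp [pvSlicePairs]
    | cons x xs =>
      cases xs with
      | nil => simp [pvSlicePairs]
      | cons y ys =>
        rw [hdj] at hlen
        simp at hlen

theorem pvJoin_slicePairs (cs : List Char) : ∀ (ps : List Nat) (a : Nat),
    PySem.Chars.join ['\\'] (pvSlicePairs cs (a :: (ps ++ [cs.length]))) = pvIns cs a ps := by
  intro ps
  induction ps with
  | nil =>
    intro a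
    have h1 : pvSlicePairs cs (a :: ([] ++ [cs.length])) =
        [PySem.List.slice cs (some ((a : Nat) : Int)) (some ((cs.length : Nat) : Int))] := rfl
    rw [h1, PySem.Chars.join_singleton, PySem.List.slice_natCast]
    show _ = List.drop a cs
    exact List.take_of_length_le (by simp)
  | cons p ps ih =>
    intro a
    have h1 : pvSlicePairs cs (a :: ((p :: ps) ++ [cs.length])) =
        PySem.List.slice cs (some ((a : Nat) : Int)) (some ((p : Nat) : Int))
          :: pvSlicePairs cs (p :: (ps ++ [cs.length])) := rfl
    rw [h1]
    obtain ⟨q, rest, hd⟩ : ∃ q rest,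
        pvSlicePairs cs (p :: (ps ++ [cs.length])) = q :: rest := by
      cases ps <;> exact ⟨_, _, rfl⟩
    rw [hd, PySem.Chars.join_cons_cons, ← hd, ih p, PySem.List.slice_natCast]
    show _ = (cs.drop a).take (p - a) ++ '\\' :: pvIns cs p ps
    simp [List.append_assoc]

theorem pvIns_step (cs : List Char) (ps : List Nat) (a k : Nat)
    (hk : ∀ p ∈ ps, a + k ≤ p) :
    pvIns cs a ps = (cs.drop a).take k ++ pvIns cs (a + k) ps := by
  cases ps with
  | nil =>
    show cs.drop a = (cs.drop a).take k ++ cs.drop (a + k)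
    conv_lhs => rw [← List.take_append_drop k (cs.drop a)]
    rw [List.drop_drop]
  | cons p ps' =>
    simp only [pvIns]
    have hp : a + k ≤ p := hk p List.mem_cons_self
    have h1 : p - a = k + (p - (a + k)) := by omega
    rw [h1, List.take_add, List.drop_drop]
    simp [List.append_assoc]

theorem pvIns_esc (cs : List Char) : ∀ (a : Nat), a ≤ cs.length →
    pvIns cs a ((pvPos (cs.drop a)).2.map (a + ·)) = pvEsc (cs.drop a) := by
  intro a
  induction hn : cs.length - a using Nat.strong_induction_on generalizing a with
  | _ n ih =>
  intro ha
  subst hn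
  by_cases hp : ['"', '"', '"'] <+: cs.drop a
  · have h3 : 3 ≤ (cs.drop a).length := by simpa using hp.length_le
    rw [List.length_drop] at h3
    rw [pvPos, dif_pos hp, pvEsc, dif_pos hp, List.drop_drop, pvMapShift]
    rw [pvIns_step cs _ a 3 (by intro p hp'; simp at hp'; omega)]
    rw [ih (cs.length - (a + 3)) (by omega) (a + 3) rfl (by omega)]
    have htake : (cs.drop a).take 3 = ['"', '"', '"'] := by
      obtain ⟨t, ht⟩ := hp
      rw [← ht]
      rfl
    rw [htake]
    rfl
  · cases hd : cs.drop a with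
    | nil =>
      rw [pvPos_nil, pvEsc_nil]
      simp [pvIns, hd]
    | cons c r =>
      have ha' : a < cs.length := by
        have := congrArg List.length hd
        simp at this
        omega
      have hcr : cs[a] = c ∧ cs.drop (a + 1) = r := by
        have h2 := (List.getElem_cons_drop ha').trans hd
        exact ⟨by injection h2, by injection h2 with _ h3⟩
      rw [hd] at hp
      by_cases hc : c = '"'
      · rw [pvPos_cons _ _ hp, pvEsc_cons _ _ hp, if_pos hc, if_pos hc]
        simp only [List.map_cons, pvMapShift, Nat.add_zero]
        rw [pvIns, Nat.sub_self, List.take_zero]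
        rw [pvIns_step cs _ a 1 (by intro p hp'; simp at hp'; omega)]
        rw [← hcr.2, ih (cs.length - (a + 1)) (by omega) (a + 1) rfl (by omega)]
        have htake : (cs.drop a).take 1 = [c] := by rw [hd]; rfl
        rw [htake, hcr.2]
        simp
      · rw [pvPos_cons _ _ hp, pvEsc_cons _ _ hp, if_neg hc, if_neg hc]
        rw [pvMapShift]
        rw [pvIns_step cs _ a 1 (by intro p hp'; simp at hp'; omega)]
        rw [← hcr.2, ih (cs.length - (a + 1)) (by omega) (a + 1) rfl (by omega)]
        have htake : (cs.drop a).take 1 = [c] := by rw [hd]; rfl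
        rw [htake, hcr.2]

theorem pvRep_append (x y : List Char) : pvRep (x ++ y) = pvRep x ++ pvRep y := by
  induction x with
  | nil => simp [pvRep]
  | cons c r ih => simp [pvRep, ih]

theorem pvB_esc (l : List Char) : ∀ cur,
    PySem.Chars.join ['"', '"', '"'] ((pvSplitAux l cur).map pvRep) =
      pvRep cur.reverse ++ pvEsc l := by
  intro cur
  fun_induction pvSplitAux l cur with
  | case1 l cur hp ih =>
    obtain ⟨q, rest, hd⟩ : ∃ q rest, pvSplitAux (l.drop 3) [] = q :: rest := by
      cases hsp : pvSplitAux (l.drop 3) [] with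
      | nil => have := pvSplitAux_length (l.drop 3) []; rw [hsp] at this; simp at this
      | cons q rest => exact ⟨q, rest, rfl⟩
    rw [pvEsc, dif_pos hp]
    rw [List.map_cons, hd, List.map_cons, PySem.Chars.join_cons_cons, ← List.map_cons, ← hd, ih]
    simp [pvRep, List.append_assoc]
  | case2 cur =>
    rw [List.map_singleton, PySem.Chars.join_singleton, pvEsc_nil]
    simp
  | case3 cur c r hnp ih =>
    rw [ih, pvEsc_cons _ _ hnp]
    simp only [List.reverse_cons, pvRep_append]
    by_cases hc : c = '"' <;> simp [pvRep, hc, List.append_assoc]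

theorem pvEsc_no_quotes (l : List Char) (h : (pvPos l).2 = []) : pvEsc l = l := by
  fun_induction pvPos l with
  | case1 l hp ih =>
    simp at h
    rw [pvEsc, dif_pos hp, ih h]
    obtain ⟨t, rfl⟩ := hp
    simp
  | case2 hp => rw [pvEsc, dif_neg (by simp)]
  | case3 r hr ih => simp at h
  | case4 c r hr hc ih =>
    simp at h
    rw [pvEsc, dif_neg hr]
    simp [hc, ih h]

-- ===== VERDICT (by name: the statement is the Claim_ definition above) =====
theorem scape_quotes_in_normalized_line_py_spec : Claim_equal_scape_quotes_in_normalized_line_py := by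
  intro target _ hpre
  unfold Spec_scape_quotes_in_normalized_line_py
  have hcount : PySem.Chars.count target.toList ['"', '"', '"'] = pvCnt target.toList := by
    rw [PySem.Chars.count, if_neg (by simp)]
    simpa using pvCount_go_eq target.toList.length target.toList 0 (le_refl _)
  have hcnt : pvCnt target.toList ≤ 1 := by
    unfold Pre_scape_quotes_in_normalized_line_py at hpre
    rw [show PySem.Str.count target "\"\"\"" =
      PySem.Chars.count target.toList ['"', '"', '"'] from rfl, hcount] at hpre
    exact hpre
  have hsplit : PySem.Chars.splitOn target.toList ['"', '"', '"'] = pvSplitAux target.toList [] := by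
    rw [PySem.Chars.splitOn]
    simpa using pvSplitOn_go_eq (target.toList.length + 1) target.toList [] [] (by omega)
  have hrep : ∀ seg : List Char, PySem.Chars.replace seg ['"'] ['\\', '"'] = pvRep seg := by
    intro seg
    rw [PySem.Chars.replace, if_neg (by simp)]
    simpa using pvReplace_go_eq seg.length seg [] (le_refl _)
  have hB : scape_quotes_in_normalized_line_py_alt target = String.ofList (pvEsc target.toList) := by
    simp only [scape_quotes_in_normalized_line_py_alt]
    rw [hsplit, if_neg (by rw [pvSplitAux_length]; omega)]
    rw [List.map_congr_left (fun seg _ => hrep seg)]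
    rw [pvB_esc target.toList []]
    simp [pvRep]
  rw [hB]
  simp only [scape_quotes_in_normalized_line_py]
  rw [pvScanA_eq target.toList 0 [] []]
  simp only [List.drop_zero, List.nil_append]
  rw [if_neg (by simp [pvPos_fst_length]; omega)]
  by_cases hn : (pvPos target.toList).2 = []
  · rw [if_pos (by simp [hn])]
    rw [show pvEsc target.toList = target.toList from pvEsc_no_quotes _ hn, String.ofList_toList]
  · rw [if_neg (by simp [hn])]
    rw [pvPartsA_eq, List.drop_zero, List.nil_append]
    simp only [List.singleton_append, List.cons_append, List.nil_append]
    have hIE := pvIns_esc target.toList 0 (by simp)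
    rw [List.drop_zero] at hIE
    rw [pvJoin_slicePairs target.toList ((pvPos target.toList).2.map (fun x => 0 + x)) 0, hIE]
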